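-- pv_equiv track=rewrite | github.com/philosophy912/automotive | src/automotive/utils/remove_comment.py | __remove_xml_comments
-- ===== SOURCE A (Python) =====
-- from typing import List, NoReturn, Optional
--
-- def __remove_xml_comments(contents: List[str]) -> List[str]:
--     xml_start = "<!--"
--     xml_end = "-->"
--     result = []
--     multi_comment = False
--     for index, content in enumerate(contents):
--         # logger.debug(f"content = [{content}]")
--         line = content.strip()
--         # 当前是否处于多行注释状态
--         if multi_comment:
--             # 此时找到了多行注释的结尾
--             if line.endswith(xml_end):
--                 multi_comment = False
--         else:
--             # 此时找到了多行注释的头部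
--             if line.startswith(xml_start) and not line.endswith(xml_end):
--                 multi_comment = True
--             else:
--                 # 判断单行注释的情况
--                 if line.startswith(xml_start) and line.endswith(xml_end):
--                     continue
--                 else:
--                     # 不是注释，需要加入到内容中
--                     result.append(content)
--     return result
-- ===== SOURCE B (Python) =====
-- def __remove_xml_comments(contents):
--     result = []
--     i = 0
--     n = len(contents)
--     while i < n:
--         line = contents[i].strip()
--         if line.startswith("<!--"):
--             if line.endswith("-->"):
--                 i += 1  # single-line comment: drop it
--             else:
--                 i += 1  # multi-line comment opener: drop until closing line
--                 while i < n and not contents[i].strip().endswith("-->"):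
--                     i += 1
--                 i += 1  # drop the closing line too (or run off the end)
--         else:
--             result.append(contents[i])
--             i += 1
--     return result
-- ===== Notes on version B (the rewrite author's own statement) =====
-- stated objective: alternative
-- what changed: Replaces A's boolean comment-state machine over enumerate with an index-based outer loop that, on seeing a multi-line comment opener, runs an explicit inner loop skipping lines until the closing '-->' line is consumed.
import Mathlib
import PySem

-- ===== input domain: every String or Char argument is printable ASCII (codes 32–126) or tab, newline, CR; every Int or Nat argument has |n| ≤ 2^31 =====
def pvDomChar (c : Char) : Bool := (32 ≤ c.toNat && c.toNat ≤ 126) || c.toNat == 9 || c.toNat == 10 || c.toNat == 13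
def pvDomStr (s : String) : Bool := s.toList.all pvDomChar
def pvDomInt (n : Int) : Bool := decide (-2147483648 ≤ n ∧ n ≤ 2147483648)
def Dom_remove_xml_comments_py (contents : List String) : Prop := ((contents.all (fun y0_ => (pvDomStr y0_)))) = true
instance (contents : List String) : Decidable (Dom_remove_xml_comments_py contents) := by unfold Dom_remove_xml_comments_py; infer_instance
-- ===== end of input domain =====

-- B replaces A's boolean comment-state machine with an index loop whose inner loop skips comment blocks (alternative decomposition, same cost); return value only.
-- ===== PORT A =====
def pvStepA (st : Bool × List String) (content : String) : Bool × List String :=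
  let line := PySem.Str.strip content
  if st.1 then
    if PySem.Str.endswith line "-->" then (false, st.2) else (true, st.2)
  else
    if PySem.Str.startswith line "<!--" && !(PySem.Str.endswith line "-->") then (true, st.2)
    else
      if PySem.Str.startswith line "<!--" && PySem.Str.endswith line "-->" then (false, st.2)
      else (false, st.2 ++ [content])

def remove_xml_comments_py (contents : List String) : List String :=
  (contents.foldl pvStepA (false, [])).2

-- ===== PORT B =====
-- B's inner while loop: drop lines until one whose strip ends with "-->" is consumed.
def pvSkipB : List String → List String
  | [] => []
  | c :: rest =>
      if PySem.Str.endswith (PySem.Str.strip c) "-->" then rest else pvSkipB rest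

theorem pvSkipB_length_le (xs : List String) : (pvSkipB xs).length ≤ xs.length := by
  induction xs with
  | nil => simp [pvSkipB]
  | cons c rest ih =>
      simp only [pvSkipB]
      split
      · simp
      · exact Nat.le_trans ih (Nat.le_succ _)

def remove_xml_comments_py_alt (contents : List String) : List String :=
  match contents with
  | [] => []
  | c :: rest =>
      let line := PySem.Str.strip c
      if PySem.Str.startswith line "<!--" then
        if PySem.Str.endswith line "-->" then remove_xml_comments_py_alt rest
        else remove_xml_comments_py_alt (pvSkipB rest)
      else c :: remove_xml_comments_py_alt rest
  termination_by contents.length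
  decreasing_by
  · simp
  · exact Nat.lt_succ_of_le (pvSkipB_length_le rest)
  · simp

-- ===== PRECONDITION & SPEC =====
def Spec_remove_xml_comments_py (contents : List String) (out : List String) : Prop := out = remove_xml_comments_py_alt contents
instance (contents : List String) (out : List String) : Decidable (Spec_remove_xml_comments_py contents out) := by unfold Spec_remove_xml_comments_py; infer_instance

-- ===== CLAIM (what is proved, stated in full; the proofs are below) =====
def Claim_equal_remove_xml_comments_py : Prop := ∀ (contents : List String), Dom_remove_xml_comments_py contents → Spec_remove_xml_comments_py contents (remove_xml_comments_py contents)

-- ===== LEMMAS AND PROOFS =====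
theorem pvFoldA_true (xs : List String) (r : List String) :
    (xs.foldl pvStepA (true, r)).2 = ((pvSkipB xs).foldl pvStepA (false, r)).2 := by
  induction xs with
  | nil => simp [pvSkipB]
  | cons c rest ih =>
      by_cases he : PySem.Chars.endswith (PySem.Chars.strip c.toList) ['-', '-', '>'] = true
      · simp [List.foldl, pvStepA, pvSkipB, he]
      · simpa [List.foldl, pvStepA, pvSkipB, he] using ih

theorem pvFoldA_false_aux (n : Nat) : ∀ (xs r : List String), xs.length ≤ n →
    (xs.foldl pvStepA (false, r)).2 = r ++ remove_xml_comments_py_alt xs := by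
  induction n with
  | zero =>
      intro xs r h
      have hx : xs = [] := List.eq_nil_of_length_eq_zero (Nat.le_zero.mp h)
      subst hx; simp [remove_xml_comments_py_alt]
  | succ n ih =>
      intro xs r h
      match xs with
      | [] => simp [remove_xml_comments_py_alt]
      | c :: rest =>
        have hr : rest.length ≤ n := Nat.le_of_succ_le_succ h
        by_cases hs : PySem.Chars.startswith (PySem.Chars.strip c.toList) ['<', '!', '-', '-'] = true
        · by_cases he : PySem.Chars.endswith (PySem.Chars.strip c.toList) ['-', '-', '>'] = true
          · simpa [List.foldl, pvStepA, hs, he, remove_xml_comments_py_alt] using ih rest r hr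
          · have hskip : (pvSkipB rest).length ≤ n :=
              Nat.le_trans (pvSkipB_length_le rest) hr
            simp [List.foldl, pvStepA, hs, he, remove_xml_comments_py_alt]
            rw [pvFoldA_true rest r]
            exact ih (pvSkipB rest) r hskip
        · rw [show (c :: rest).foldl pvStepA (false, r) =
              rest.foldl pvStepA (false, r ++ [c]) by simp [List.foldl, pvStepA, hs]]
          rw [ih rest (r ++ [c]) hr]
          simp [remove_xml_comments_py_alt, hs]

theorem pvFoldA_false (xs r : List String) :
    (xs.foldl pvStepA (false, r)).2 = r ++ remove_xml_comments_py_alt xs :=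
  pvFoldA_false_aux xs.length xs r (Nat.le_refl _)

-- ===== VERDICT (by name: the statement is the Claim_ definition above) =====
theorem remove_xml_comments_py_spec : Claim_equal_remove_xml_comments_py := by
  intro contents _
  show remove_xml_comments_py contents = remove_xml_comments_py_alt contents
  simpa [remove_xml_comments_py] using pvFoldA_false contents []
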